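/- GENERATED by mk_final_copies.py from the proof of the farm's unit `start_decoder.C11b` (farm:start_decoder.C11b.1: Lemmas.lean) as the
   re-elaboration sweep compiled it — do not edit. -/
import Asan.CheckWalk
import Vorbis.Spec.Reader
import Vorbis.Spec.StartDecoderC4
import Vorbis.Spec.Units.start_decoder_C11b

open X86 X86.User Asan Vorbis Vorbis.Spec Vorbis.Spec.StartDecoder

set_option maxRecDepth 4000
set_option maxHeartbeats 4000000

namespace Vorbis.Spec.start_decoder_C11b

/-- **A window a stretch of C11b may write**: the stack below the steady `R` (a pushed return address, a callee's frame), the fields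
`[c + 16, c + 25)` of the struct (`minimum_value`, `delta_value`, `value_bits`: NOT `lookup_type` at `c + 25`, NOT `lookup_values`), the
reader's five windows of `*f`. Every such window is a `C11.QuietWin11`. -/
def QuietP (g : Ghost) (c : Nat) (w : Span) : Prop :=
  (g.R - 408 ≤ w.lo ∧ w.hi ≤ g.R) ∨
  (c + 16 ≤ w.lo ∧ w.hi ≤ c + 25) ∨
  (g.f + 48 ≤ w.lo ∧ w.hi ≤ g.f + 56) ∨
  (g.f + 84 ≤ w.lo ∧ w.hi ≤ g.f + 96) ∨
  (g.f + 136 ≤ w.lo ∧ w.hi ≤ g.f + 144) ∨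
  (g.f + 1484 ≤ w.lo ∧ w.hi ≤ g.f + 1749) ∨
  (g.f + 1752 ≤ w.lo ∧ w.hi ≤ g.f + 1784)

/-- **THE CARRY OF `In11P`** over a stretch of C11b (`QuietP` windows, the shadow untouched): `In11P` at the new state and program
counter, and `cb(i)` unmoved. `C11.core11` gives `Frame`, `Cur`, K1 – K5, `dimensions`, `entries`, `multiplicands`; `lookup_type`
(`c + 25`) and `lookup_values` (`[c + 28, c + 32)`) are off every `QuietP` window. -/
theorem carryP {u₀ : State} {g : Ghost} {i : Nat} {A2 A3 Ai : Arena} {A : Arena × List Obj} {pc pc' : Word} {v w : State}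
    {ws : List Span} (h : In11P u₀ g i A2 A3 Ai A pc v)
    (hs : Mem.SameExcept ws v.mem w.mem) (hun : ShadowUntouched v.mem w.mem)
    (hq : ∀ x, x ∈ ws → QuietP g (g.cb v.mem i) x) (hb : Bits (g.Blk A) g.len w.mem g.f)
    (hrip : w.rip = pc') (hrsp : w.reg .rsp = v.reg .rsp) (hcode : CodeOK u₀ w.mem) (hinv : abiInv w)
    (hr14 : w.reg .r14 = v.reg .r14) :
    In11P u₀ g i A2 A3 Ai A pc' w ∧ g.cb w.mem i = g.cb v.mem i := by
  have hq11 : ∀ x, x ∈ ws → C11.QuietWin11 g (g.cb v.mem i) x := by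
    intro x hx
    have k := hq x hx
    unfold QuietP at k
    unfold C11.QuietWin11
    omega
  obtain ⟨hF, hC, hcb, hk15, e_dim, e_ent, e_mu⟩ :=
    C11.core11 h.frame h.cur h.k hs hun hq11 hb hrip hrsp hcode hinv hr14
  have hpos : Pos g A := Pos.of h.frame h.cur
  have hm0 : MInv g i A2 A3 Ai A v.mem := MInv.of h.frame h.cur
  have hcw := hm0.c_where
  obtain ⟨p1, p2, p3, p4, p5, p6, p7, p8, p9, p10, p11, p12, p13, p14⟩ := hpos
  -- `lookup_type` and `lookup_values`: `[c + 25, c + 26)` and `[c + 28, c + 32)` are off every window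
  have hty : Mem.EqOn (g.cb v.mem i + 25) (g.cb v.mem i + 26) v.mem w.mem := by
    apply hs.eqOn
    intro x hx
    have k := hq x hx
    unfold QuietP at k
    omega
  have hlv : Mem.EqOn (g.cb v.mem i + 28) (g.cb v.mem i + 32) v.mem w.mem := by
    apply hs.eqOn
    intro x hx
    have k := hq x hx
    unfold QuietP at k
    omega
  have e_ty : Codebook.lookup_type w.mem (g.cb v.mem i) = Codebook.lookup_type v.mem (g.cb v.mem i) := by
    simp only [vacc, voff]
    exact hty.u8 _ (Nat.le_refl _) (Nat.le_refl _) (by omega)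
  have e_lv : Codebook.lookup_values w.mem (g.cb v.mem i) = Codebook.lookup_values v.mem (g.cb v.mem i) := by
    simp only [vacc, voff]
    exact hlv.u32 _ (Nat.le_refl _) (Nat.le_refl _) (by omega)
  refine ⟨?_, hcb⟩
  exact
    { frame := hF
      cur := hC
      k := by rw [hcb]; exact hk15
      type_12 := by rw [hcb, e_ty]; exact h.type_12
      prod_le := by rw [hcb, e_ent, e_dim]; exact h.prod_le
      noTemps := h.noTemps
      lv0 := by rw [hcb, e_lv]; exact h.lv0
      mu0 := by rw [hcb, e_mu]; exact h.mu0 }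

/-- The footprint of a stretch of C11b from a cut point to the return of its `get_bits`: the stack below the steady `R`, ONE field
window `[lo, hi)` of the struct, the reader's five windows of `*f`. -/
def stretchWins (R f lo hi : Nat) : List Span :=
  [⟨R - 408, R⟩, ⟨lo, hi⟩, ⟨f + 48, f + 56⟩, ⟨f + 84, f + 96⟩, ⟨f + 136, f + 144⟩, ⟨f + 1484, f + 1749⟩, ⟨f + 1752, f + 1784⟩]

/-- Every window of `stretchWins` is a `QuietP` window when the field window lies in `[c + 16, c + 25)`. -/
theorem stretchWins_quiet {g : Ghost} {c lo hi : Nat} (h1 : c + 16 ≤ lo) (h2 : hi ≤ c + 25) :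
    ∀ x, x ∈ stretchWins g.R g.f lo hi → QuietP g c x := by
  intro x hx
  unfold stretchWins at hx
  simp only [List.mem_cons, List.mem_nil_iff, or_false] at hx
  unfold QuietP
  rcases hx with rfl | rfl | rfl | rfl | rfl | rfl | rfl
  · left
    exact ⟨Nat.le_refl _, Nat.le_refl _⟩
  · right; left
    exact ⟨h1, h2⟩
  · right; right; left
    exact ⟨Nat.le_refl _, Nat.le_refl _⟩
  · right; right; right; left
    exact ⟨Nat.le_refl _, Nat.le_refl _⟩
  · right; right; right; right; left
    exact ⟨Nat.le_refl _, Nat.le_refl _⟩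
  · right; right; right; right; right; left
    exact ⟨Nat.le_refl _, Nat.le_refl _⟩
  · right; right; right; right; right; right
    exact ⟨Nat.le_refl _, Nat.le_refl _⟩

/-- **The stores of a stretch before its `get_bits`**: the return address of the check call (pushed at `sp`), the field store at `b`,
the return address of `get_bits` (pushed at `sp` again) write the stack window and the field window only. -/
theorem stores_same (m : Mem) (sp b : Word) (k x y z R lo hi : Nat)
    (hsp1 : R - 408 ≤ sp.toNat) (hsp2 : sp.toNat + 8 ≤ R) (hb1 : lo ≤ b.toNat) (hb2 : b.toNat + k ≤ hi)
    (hR : R < 2 ^ 63) (hhi : hi < 2 ^ 63) :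
    Mem.SameExcept [⟨R - 408, R⟩, ⟨lo, hi⟩] m (((m.writeLE sp 8 x).writeLE b k y).writeLE sp 8 z) := by
  refine Mem.SameExcept.step_writeLE _ 8 _ (Mem.SameExcept.step_writeLE _ k _ (Mem.SameExcept.writeLE _ m _ 8 _ ?_ ?_) ?_ ?_) ?_ ?_
  · omega
  · exact ⟨⟨R - 408, R⟩, List.mem_cons_self, hsp1, hsp2⟩
  · omega
  · exact ⟨⟨lo, hi⟩, List.mem_cons_of_mem _ List.mem_cons_self, hb1, hb2⟩
  · omega
  · exact ⟨⟨R - 408, R⟩, List.mem_cons_self, hsp1, hsp2⟩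

/-- **The stores of a stretch and the footprint of its `get_bits` as ONE footprint** (`stretchWins`) over the cut point's memory:
the callee's stack window `[a, b)` lies below the steady `R`. -/
theorem glue_reader {R f lo hi a b : Nat} {m m1 m2 : Mem}
    (h1 : Mem.SameExcept [⟨R - 408, R⟩, ⟨lo, hi⟩] m m1)
    (h2 : Mem.SameExcept [⟨a, b⟩, ⟨f + 48, f + 56⟩, ⟨f + 84, f + 96⟩, ⟨f + 136, f + 144⟩, ⟨f + 1484, f + 1749⟩,
      ⟨f + 1752, f + 1784⟩] m1 m2)
    (ha : R - 408 ≤ a) (hb : b ≤ R) : Mem.SameExcept (stretchWins R f lo hi) m m2 := by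
  unfold stretchWins
  refine Mem.SameExcept.trans (ν := m1) ?_ ?_
  · apply h1.mono
    intro w hw x k1 k2
    simp only [List.mem_cons, List.mem_nil_iff, or_false] at hw
    rcases hw with rfl | rfl
    · exact ⟨_, List.mem_cons_self, k1, k2⟩
    · exact ⟨_, List.mem_cons_of_mem _ List.mem_cons_self, k1, k2⟩
  · apply h2.mono
    intro w hw x k1 k2
    simp only [List.mem_cons, List.mem_nil_iff, or_false] at hw
    rcases hw with rfl | rfl | rfl | rfl | rfl | rfl
    · simp only [] at k1 k2
      exact ⟨_, List.mem_cons_self, by simp only []; omega, by simp only []; omega⟩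
    · exact ⟨_, List.mem_cons_of_mem _ (List.mem_cons_of_mem _ List.mem_cons_self), k1, k2⟩
    · exact ⟨_, List.mem_cons_of_mem _ (List.mem_cons_of_mem _ (List.mem_cons_of_mem _ List.mem_cons_self)), k1, k2⟩
    · exact ⟨_, List.mem_cons_of_mem _ (List.mem_cons_of_mem _ (List.mem_cons_of_mem _ (List.mem_cons_of_mem _
        List.mem_cons_self))), k1, k2⟩
    · exact ⟨_, List.mem_cons_of_mem _ (List.mem_cons_of_mem _ (List.mem_cons_of_mem _ (List.mem_cons_of_mem _
        (List.mem_cons_of_mem _ List.mem_cons_self)))), k1, k2⟩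
    · exact ⟨_, List.mem_cons_of_mem _ (List.mem_cons_of_mem _ (List.mem_cons_of_mem _ (List.mem_cons_of_mem _
        (List.mem_cons_of_mem _ (List.mem_cons_of_mem _ List.mem_cons_self))))), k1, k2⟩

/-- The byte that `lea ebx,[rax+1] ; mov [r14+18H],bl` stores when `rax < 16`: `rax + 1`. -/
theorem byte_val (x : Word) (h : x.toNat < 16) :
    (BitVec.setWidth 8 (BitVec.setWidth 32 (x + 1).toBitVec)).toNat = x.toNat + 1 := by
  simp only [BitVec.toNat_setWidth, UInt64.toBitVec_add, BitVec.toNat_add, UInt64.toNat_toBitVec]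
  have h1 : (1 : UInt64).toNat = 1 := rfl
  rw [h1]
  omega

/-- The byte stored at `b` is read back after the second push at `sp` (eight bytes off `b`). -/
theorem stored_byte (m : Mem) (sp b : Word) (x y z : Nat) (hd : b.toNat + 1 ≤ sp.toNat ∨ sp.toNat + 8 ≤ b.toNat)
    (h1 : sp.toNat + 8 ≤ 2 ^ 64) (h2 : b.toNat + 1 ≤ 2 ^ 64) :
    (((m.writeLE sp 8 x).writeLE b 1 y).writeLE sp 8 z).readLE b 1 = y % 256 := by
  rw [Mem.readLE_writeLE_disjoint_noWrap _ sp 8 z b 1 h1 h2 hd]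
  rw [Mem.readLE_writeLE_same _ b 1 y (by omega)]

/-- **Leg A** (`cut152` 0x114be4 … `cut153` 0x114beb; stb_vorbis_fixed.c:3879): `mov edi,eax ; call float32_unpack`. The callee's
footprint is its own stack (40 bytes below the pushed return address); `In11P` is carried by `carryP` over the one stack window,
`r15 = f` is callee-saved. -/
theorem legA {Lay : Layout} (hLay : Lay.hi = 0x1000000) {μ : Microarch} (hμ : UserX.MicroOK μ) {u₀ : State}
    (hcode : HasCodeNat Lay u₀ Vorbis.L.start_decoder.entry Vorbis.Code.code_start_decoder.nat Vorbis.L.start_decoder.size)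
    (hfu : ∀ (others : List Obj) (frames : List (Nat × FrameLayout)), Calls Lay μ Vorbis.WayInv (Vorbis.conv u₀) Vorbis.L.float32_unpack.entry (Vorbis.Spec.float32_unpack.spec others frames))
    {g : Ghost} {i : Nat} {A2 A3 Ai : Arena} {A : Arena × List Obj} {v : State}
    (hat : In11P u₀ g i A2 A3 Ai A Vorbis.L.start_decoder.cut152 v) (hr15 : v.reg .r15 = addr g.f) :
    ReachVia Lay μ WayInv v (fun w => In11P u₀ g i A2 A3 Ai A Vorbis.L.start_decoder.cut153 w ∧ w.reg .r15 = addr g.f) := by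
  have hfr := hat.frame
  have he := hfr.entry
  v_entry he
  simp only [depth] at he_room he_stack
  have w_rip := hfr.rip
  obtain ⟨hr1, hr2⟩ := hfr.r_eq
  simp only [steady] at hr1
  have hRA : g.RA = (g.e.reg .rsp).toNat := rfl
  have c_rsp : v.reg .rsp = g.e.reg .rsp - 1480 := by
    rw [hfr.rsp]
    refine (eq_addr _ _ ?_).symm
    unfold Ghost.R Ghost.RA steady
    u_omega
  have hobr := hat.cur.sd.bits.OBR
  simp only [voff] at hobr
  have t1 : (g.e.reg .rsp - 1488).toNat = (g.e.reg .rsp).toNat - 1488 := by u_omega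
  have c_r15 : v.reg .r15 = addr g.f := hr15
  have hst := C4.obj_stack hfr hat.cur.hand
  have w_eq : Mem.EqOn Vorbis.L.textLo Vorbis.L.textHi u₀.mem v.mem := hfr.code
  have hdf : v.flags .df = false := (show abiInv _ from hfr.inv).1
  have hmx : v.mxcsr &&& 0x1F80 = 0x1F80 := (show abiInv _ from hfr.inv).2
  have hsse := Vorbis.sseOK_of_abiInv hfr.inv
  have hfu' := hfu A.2 g.frames'
  u_walk hcode [hμ.vendor] until [Vorbis.L.start_decoder.cut153] span [Vorbis.L.textLo, Vorbis.L.textHi] side (v_side)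
  case call_inv => v_inv
  case pre_114be6 =>
    have hun : ShadowUntouched v.mem s_114be6.mem := by v_untouched
    show ShadowPre A.2 g.frames' s_114be6
    refine ⟨?_, hfr.offText⟩
    have hrsp8 : (s_114be6.reg .rsp).toNat + 8 = g.R := by
      rw [w_rsp, t1]
      omega
    rw [hrsp8]
    exact hfr.shadow.untouched hun
  -- the return of float32_unpack = `cut153`
  v_after_call w_rsp_114be6 w_mem_114be6
  simp only [t1] at w_same
  have hpush : Mem.SameExcept [⟨g.R - 408, g.R⟩] v.mem (v.mem.writeLE (g.e.reg .rsp - 1488) 8 1133547) := by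
    refine Mem.SameExcept.writeLE _ v.mem _ 8 _ ?_ ⟨⟨g.R - 408, g.R⟩, List.mem_cons_self, ?_, ?_⟩
    · rw [t1]
      omega
    · rw [t1]
      show g.R - 408 ≤ _
      omega
    · rw [t1]
      show _ ≤ g.R
      omega
  have hall : Mem.SameExcept [⟨g.R - 408, g.R⟩] v.mem s_114be6r.mem := by
    refine Mem.SameExcept.trans hpush ?_
    apply w_same.mono
    intro w hw a h1 h2
    rw [List.mem_singleton.mp hw] at h1 h2
    simp only [] at h1 h2
    exact ⟨_, List.mem_cons_self, by simp only []; omega, by simp only []; omega⟩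
  have hq : ∀ x, x ∈ [(⟨g.R - 408, g.R⟩ : Span)] → QuietP g (g.cb v.mem i) x := by
    intro x hx
    rw [List.mem_singleton.mp hx]
    unfold QuietP
    left
    exact ⟨Nat.le_refl _, Nat.le_refl _⟩
  have hun0 : ShadowUntouched v.mem s_114be6.mem := by v_untouched
  have hp : ShadowUntouched s_114be6.mem s_114be6r.mem := w_post
  have hunAll : ShadowUntouched v.mem s_114be6r.mem := Mem.EqOn.trans hun0 hp
  have heq : Mem.EqOn g.f (g.f + 1808) v.mem s_114be6r.mem := by
    apply hall.eqOn
    intro w hw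
    rw [List.mem_singleton.mp hw]
    show g.f + 1808 ≤ g.R - 408 ∨ g.R ≤ g.f
    exact hst
  have habi : abiInv s_114be6r := Vorbis.abiInv_of w_df w_mx
  have hrsp : s_114be6r.reg .rsp = v.reg .rsp := by
    rw [w_rsp, c_rsp]
  obtain ⟨hP, _⟩ := carryP (pc' := Vorbis.L.start_decoder.cut153) hat hall hunAll hq (C4.bits_same hat.cur heq) w_rip hrsp
    (Vorbis.conv_code_eqOn w_code) habi (w_kept .r14 rfl)
  exact ReachVia.done ⟨hP, (w_kept .r15 rfl).trans c_r15⟩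

/-- **Leg B** (`cut153` 0x114beb … `cut154` 0x114c09; stb_vorbis_fixed.c:3879–3880): `movd ebx,xmm0`, the checked store
`c->delta_value` (`[c + 20, c + 24)`, check 0x114bf3: inside the codebooks block), `get_bits(f, 4)`. At its return: `In11P` (`carryP`
over `stretchWins`), `r15 = f`, and `eax < 16` (`GetBitsResult 4`). -/
theorem legB {Lay : Layout} (hLay : Lay.hi = 0x1000000) {μ : Microarch} (hμ : UserX.MicroOK μ) {u₀ : State}
    (hcode : HasCodeNat Lay u₀ Vorbis.L.start_decoder.entry Vorbis.Code.code_start_decoder.nat Vorbis.L.start_decoder.size)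
    (hgb : ∀ (others : List Obj) (frames : List (Nat × FrameLayout)) (Blk : Block → Prop) (len : Nat), Calls Lay μ Vorbis.WayInv (Vorbis.conv u₀) Vorbis.L.get_bits.entry (Vorbis.Spec.get_bits.spec others frames Blk len))
    (hst4 : Asan.SmallCheck Lay μ Vorbis.WayInv (Vorbis.CodeOK u₀) [.rax, .rcx, .rdx] 4 Vorbis.L.__asan_store4_noabort.entry)
    {g : Ghost} {i : Nat} {A2 A3 Ai : Arena} {A : Arena × List Obj} {v : State}
    (hat : In11P u₀ g i A2 A3 Ai A Vorbis.L.start_decoder.cut153 v) (hr15 : v.reg .r15 = addr g.f) :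
    ReachVia Lay μ WayInv v (fun w => In11P u₀ g i A2 A3 Ai A Vorbis.L.start_decoder.cut154 w ∧ w.reg .r15 = addr g.f ∧
      (w.reg .rax).toNat < 16) := by
  have hfr := hat.frame
  have he := hfr.entry
  v_entry he
  simp only [depth] at he_room he_stack
  have w_rip := hfr.rip
  obtain ⟨hr1, hr2⟩ := hfr.r_eq
  simp only [steady] at hr1
  have hRA : g.RA = (g.e.reg .rsp).toNat := rfl
  have c_rsp : v.reg .rsp = g.e.reg .rsp - 1480 := by
    rw [hfr.rsp]
    refine (eq_addr _ _ ?_).symm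
    unfold Ghost.R Ghost.RA steady
    u_omega
  -- the struct `c = cb(i)`: inside the codebooks block, a setup block of the arena
  have ha := hat.cur.sd.arena
  have hcb := hat.cur.ages.cbOK
  have hBA : A.1.Blk (codebooksBlock v.mem g.f) := hcb.F2.mono hat.cur.ages.exti
  have hcin := hcb.cb_in i hat.cur.lt
  have hboff := ha.block_off hBA
  have hbin := arena_inside ha hBA
  have hbnd := ha.bounds
  simp only [vblock, Off.sizeof.Codebook] at hcin hboff hbin
  have hcdef : stb_vorbis.codebooks_at v.mem g.f i = g.cb v.mem i := rfl
  rw [hcdef] at hcin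
  have c_r14n : (v.reg .r14).toNat = g.cb v.mem i := by
    rw [hat.cur.r14]
    exact toNat_addr _ (by omega)
  have hBA' : A.1.Block (stb_vorbis.codebooks v.mem g.f) (2120 * (stb_vorbis.codebook_count v.mem g.f).toNat) := hBA
  have e20 : v.reg .r14 + 20 = addr (g.cb v.mem i + 20) := by
    rw [hat.cur.r14]
    exact Vorbis.addr_add_lit _ 20
  have t20 : (v.reg .r14 + 20).toNat = g.cb v.mem i + 20 := by
    rw [e20]
    exact toNat_addr _ (by omega)
  have hout := hat.cur.hand.objOut
  simp only [voff] at hout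
  have hobr := hat.cur.sd.bits.OBR
  simp only [voff] at hobr
  have t1 : (g.e.reg .rsp - 1488).toNat = (g.e.reg .rsp).toNat - 1488 := by u_omega
  have c_r15 : v.reg .r15 = addr g.f := hr15
  have hst := C4.obj_stack hfr hat.cur.hand
  have htx := hat.cur.hand.arenaText
  simp only [Vorbis.L.textHi] at htx
  have w_eq : Mem.EqOn Vorbis.L.textLo Vorbis.L.textHi u₀.mem v.mem := hfr.code
  have hdf : v.flags .df = false := (show abiInv _ from hfr.inv).1
  have hmx : v.mxcsr &&& 0x1F80 = 0x1F80 := (show abiInv _ from hfr.inv).2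
  have hsse := Vorbis.sseOK_of_abiInv hfr.inv
  have hgb' := hgb A.2 g.frames' (g.Blk A) g.len
  u_walk hcode [hμ.vendor] until [Vorbis.L.start_decoder.cut154] span [Vorbis.L.textLo, Vorbis.L.textHi] side (v_side)
  case check_114bf3 =>
    -- 0x114bf3: the 4 bytes of `c->delta_value` at `c + 20`, inside the codebooks block (a live setup block)
    have hun : ShadowUntouched v.mem s_114bf3.mem := by v_untouched
    have hsh' := hfr.shadow.untouched hun
    refine ⟨hsh'.sealed, ?_⟩
    rw [t20]
    exact ha.block_acc_inv hsh' hBA' (by omega) (by omega) (by decide)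
  case call_inv => v_inv
  case pre_114c04 =>
    have hun : ShadowUntouched v.mem s_114c04.mem := by v_untouched
    have hs0 := stores_same v.mem (g.e.reg .rsp - 1488) (v.reg .r14 + 20) 4 1133560 x_114beb.toNat 1133577 g.R
      (g.cb v.mem i + 20) (g.cb v.mem i + 24) (by rw [t1]; omega) (by rw [t1]; omega) (by rw [t20]; omega) (by rw [t20]; omega)
      (by omega) (by omega)
    refine ⟨C4.reader_pre hfr hat.cur hun ?_ ?_ ?_, ?_⟩
    · rw [w_rsp, t1]
      omega
    · exact w_rdi
    · rw [w_mem]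
      apply hs0.eqOn
      intro w hw
      simp only [List.mem_cons, List.mem_nil_iff, or_false] at hw
      rcases hw with rfl | rfl
      · show g.f + 1808 ≤ g.R - 408 ∨ g.R ≤ g.f
        exact hst
      · show g.f + 1808 ≤ g.cb v.mem i + 20 ∨ g.cb v.mem i + 24 ≤ g.f
        omega
    · rw [bitsArg_def, w_rsi]
      decide
  -- the return of `get_bits(f, 4)` = `cut154`
  v_after_call w_rsp_114c04 w_mem_114c04
  have hf : (s_114c04.reg .rdi).toNat = g.f := by
    rw [w_rdi_114c04]
    exact toNat_addr g.f (by omega)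
  simp only [hf, t1] at w_same
  have hs0 := stores_same v.mem (g.e.reg .rsp - 1488) (v.reg .r14 + 20) 4 1133560 x_114beb.toNat 1133577 g.R
    (g.cb v.mem i + 20) (g.cb v.mem i + 24) (by rw [t1]; omega) (by rw [t1]; omega) (by rw [t20]; omega) (by rw [t20]; omega)
    (by omega) (by omega)
  -- the check call's push, the store, the push and the reader's footprint as one footprint over the cut point's memory
  have hall : Mem.SameExcept (stretchWins g.R g.f (g.cb v.mem i + 20) (g.cb v.mem i + 24)) v.mem s_114c04r.mem :=
    glue_reader hs0 w_same (by omega) (by omega)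
  have hq := stretchWins_quiet (g := g) (c := g.cb v.mem i) (lo := g.cb v.mem i + 20) (hi := g.cb v.mem i + 24)
    (by omega) (by omega)
  have hp : GetBitsSpecPost (g.Blk A) g.len (s_114c04.reg .rdi).toNat (bitsArg s_114c04) s_114c04 s_114c04r := w_post
  have hbits := hp.bits.bits
  rw [hf] at hbits
  have hun0 : ShadowUntouched v.mem s_114c04.mem := by v_untouched
  have hunAll : ShadowUntouched v.mem s_114c04r.mem := Mem.EqOn.trans hun0 hp.untouched
  have habi : abiInv s_114c04r := Vorbis.abiInv_of w_df w_mx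
  have hrsp : s_114c04r.reg .rsp = v.reg .rsp := by
    rw [w_rsp, c_rsp]
  obtain ⟨hP, _⟩ := carryP (pc' := Vorbis.L.start_decoder.cut154) hat hall hunAll hq hbits w_rip hrsp
    (Vorbis.conv_code_eqOn w_code) habi (w_kept .r14 rfl)
  -- the result of `get_bits(f, 4)`
  have hrax : (s_114c04r.reg .rax).toNat < 16 := by
    have harg : bitsArg s_114c04 = 4 := by
      rw [bitsArg_def, w_rsi_114c04]
      decide
    have hres := hp.bits.result
    rw [harg] at hres
    unfold GetBitsResult at hres
    omega
  exact ReachVia.done ⟨hP, (w_kept .r15 rfl).trans c_r15, hrax⟩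

/-- **Leg C** (`cut154` 0x114c09 … `cut155` 0x114c26; stb_vorbis_fixed.c:3880–3881): `lea ebx,[rax+1]`, the checked byte store
`c->value_bits = x + 1` (`[c + 24]`, check 0x114c10: inside the codebooks block; `x = eax < 16`), `get_bits(f, 1)`. At its return:
`In11P` (`carryP` over `stretchWins`) and `1 ≤ value_bits ≤ 16` (the stored byte read back through the reader's footprint). -/
theorem legC {Lay : Layout} (hLay : Lay.hi = 0x1000000) {μ : Microarch} (hμ : UserX.MicroOK μ) {u₀ : State}
    (hcode : HasCodeNat Lay u₀ Vorbis.L.start_decoder.entry Vorbis.Code.code_start_decoder.nat Vorbis.L.start_decoder.size)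
    (hgb : ∀ (others : List Obj) (frames : List (Nat × FrameLayout)) (Blk : Block → Prop) (len : Nat), Calls Lay μ Vorbis.WayInv (Vorbis.conv u₀) Vorbis.L.get_bits.entry (Vorbis.Spec.get_bits.spec others frames Blk len))
    (hst1 : Asan.SmallCheck Lay μ Vorbis.WayInv (Vorbis.CodeOK u₀) [.rax, .rdx] 1 Vorbis.L.__asan_store1_noabort.entry)
    {g : Ghost} {i : Nat} {A2 A3 Ai : Arena} {A : Arena × List Obj} {v : State}
    (hat : In11P u₀ g i A2 A3 Ai A Vorbis.L.start_decoder.cut154 v) (hr15 : v.reg .r15 = addr g.f)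
    (hrax : (v.reg .rax).toNat < 16) :
    ReachVia Lay μ WayInv v (fun w => In11P u₀ g i A2 A3 Ai A Vorbis.L.start_decoder.cut155 w ∧
      (1 ≤ Codebook.value_bits w.mem (g.cb w.mem i) ∧ Codebook.value_bits w.mem (g.cb w.mem i) ≤ 16)) := by
  have hfr := hat.frame
  have he := hfr.entry
  v_entry he
  simp only [depth] at he_room he_stack
  have w_rip := hfr.rip
  obtain ⟨hr1, hr2⟩ := hfr.r_eq
  simp only [steady] at hr1
  have hRA : g.RA = (g.e.reg .rsp).toNat := rfl
  have c_rsp : v.reg .rsp = g.e.reg .rsp - 1480 := by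
    rw [hfr.rsp]
    refine (eq_addr _ _ ?_).symm
    unfold Ghost.R Ghost.RA steady
    u_omega
  -- the struct `c = cb(i)`: inside the codebooks block, a setup block of the arena
  have ha := hat.cur.sd.arena
  have hcb := hat.cur.ages.cbOK
  have hBA : A.1.Blk (codebooksBlock v.mem g.f) := hcb.F2.mono hat.cur.ages.exti
  have hcin := hcb.cb_in i hat.cur.lt
  have hboff := ha.block_off hBA
  have hbin := arena_inside ha hBA
  have hbnd := ha.bounds
  simp only [vblock, Off.sizeof.Codebook] at hcin hboff hbin
  have hcdef : stb_vorbis.codebooks_at v.mem g.f i = g.cb v.mem i := rfl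
  rw [hcdef] at hcin
  have c_r14n : (v.reg .r14).toNat = g.cb v.mem i := by
    rw [hat.cur.r14]
    exact toNat_addr _ (by omega)
  have hBA' : A.1.Block (stb_vorbis.codebooks v.mem g.f) (2120 * (stb_vorbis.codebook_count v.mem g.f).toNat) := hBA
  have e24 : v.reg .r14 + 24 = addr (g.cb v.mem i + 24) := by
    rw [hat.cur.r14]
    exact Vorbis.addr_add_lit _ 24
  have t24 : (v.reg .r14 + 24).toNat = g.cb v.mem i + 24 := by
    rw [e24]
    exact toNat_addr _ (by omega)
  have hout := hat.cur.hand.objOut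
  simp only [voff] at hout
  have hobr := hat.cur.sd.bits.OBR
  simp only [voff] at hobr
  have t1 : (g.e.reg .rsp - 1488).toNat = (g.e.reg .rsp).toNat - 1488 := by u_omega
  have c_r15 : v.reg .r15 = addr g.f := hr15
  have hst := C4.obj_stack hfr hat.cur.hand
  have htx := hat.cur.hand.arenaText
  simp only [Vorbis.L.textHi] at htx
  have w_eq : Mem.EqOn Vorbis.L.textLo Vorbis.L.textHi u₀.mem v.mem := hfr.code
  have hdf : v.flags .df = false := (show abiInv _ from hfr.inv).1
  have hmx : v.mxcsr &&& 0x1F80 = 0x1F80 := (show abiInv _ from hfr.inv).2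
  have hsse := Vorbis.sseOK_of_abiInv hfr.inv
  have hgb' := hgb A.2 g.frames' (g.Blk A) g.len
  u_walk hcode [hμ.vendor] until [Vorbis.L.start_decoder.cut155] span [Vorbis.L.textLo, Vorbis.L.textHi] side (v_side)
  case check_114c10 =>
    -- 0x114c10: the byte `c->value_bits` at `c + 24`, inside the codebooks block (a live setup block)
    have hun : ShadowUntouched v.mem s_114c10.mem := by v_untouched
    have hsh' := hfr.shadow.untouched hun
    refine ⟨hsh'.sealed, ?_⟩
    rw [t24]
    exact ha.block_acc_inv hsh' hBA' (by omega) (by omega) (by decide)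
  case call_inv => v_inv
  case pre_114c21 =>
    have hun : ShadowUntouched v.mem s_114c21.mem := by v_untouched
    have hs0 := stores_same v.mem (g.e.reg .rsp - 1488) (v.reg .r14 + 24) 1 1133589
      (BitVec.setWidth 8 (BitVec.setWidth 32 (v.reg .rax + 1).toBitVec)).toNat 1133606 g.R
      (g.cb v.mem i + 24) (g.cb v.mem i + 25) (by rw [t1]; omega) (by rw [t1]; omega) (by rw [t24]; omega) (by rw [t24]; omega)
      (by omega) (by omega)
    refine ⟨C4.reader_pre hfr hat.cur hun ?_ ?_ ?_, ?_⟩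
    · rw [w_rsp, t1]
      omega
    · exact w_rdi
    · rw [w_mem]
      apply hs0.eqOn
      intro w hw
      simp only [List.mem_cons, List.mem_nil_iff, or_false] at hw
      rcases hw with rfl | rfl
      · show g.f + 1808 ≤ g.R - 408 ∨ g.R ≤ g.f
        exact hst
      · show g.f + 1808 ≤ g.cb v.mem i + 24 ∨ g.cb v.mem i + 25 ≤ g.f
        omega
    · rw [bitsArg_def, w_rsi]
      decide
  -- the return of `get_bits(f, 1)` = `cut155`
  v_after_call w_rsp_114c21 w_mem_114c21
  have hf : (s_114c21.reg .rdi).toNat = g.f := by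
    rw [w_rdi_114c21]
    exact toNat_addr g.f (by omega)
  simp only [hf, t1] at w_same
  have hs0 := stores_same v.mem (g.e.reg .rsp - 1488) (v.reg .r14 + 24) 1 1133589
    (BitVec.setWidth 8 (BitVec.setWidth 32 (v.reg .rax + 1).toBitVec)).toNat 1133606 g.R
    (g.cb v.mem i + 24) (g.cb v.mem i + 25) (by rw [t1]; omega) (by rw [t1]; omega) (by rw [t24]; omega) (by rw [t24]; omega)
    (by omega) (by omega)
  -- the check call's push, the store, the push and the reader's footprint as one footprint over the cut point's memory
  have hall : Mem.SameExcept (stretchWins g.R g.f (g.cb v.mem i + 24) (g.cb v.mem i + 25)) v.mem s_114c21r.mem :=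
    glue_reader hs0 w_same (by omega) (by omega)
  have hq := stretchWins_quiet (g := g) (c := g.cb v.mem i) (lo := g.cb v.mem i + 24) (hi := g.cb v.mem i + 25)
    (by omega) (by omega)
  have hp : GetBitsSpecPost (g.Blk A) g.len (s_114c21.reg .rdi).toNat (bitsArg s_114c21) s_114c21 s_114c21r := w_post
  have hbits := hp.bits.bits
  rw [hf] at hbits
  have hun0 : ShadowUntouched v.mem s_114c21.mem := by v_untouched
  have hunAll : ShadowUntouched v.mem s_114c21r.mem := Mem.EqOn.trans hun0 hp.untouched
  have habi : abiInv s_114c21r := Vorbis.abiInv_of w_df w_mx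
  have hrsp : s_114c21r.reg .rsp = v.reg .rsp := by
    rw [w_rsp, c_rsp]
  obtain ⟨hP, hcb2⟩ := carryP (pc' := Vorbis.L.start_decoder.cut155) hat hall hunAll hq hbits w_rip hrsp
    (Vorbis.conv_code_eqOn w_code) habi (w_kept .r14 rfl)
  -- `c->value_bits` = the stored byte `rax + 1`: read through the reader's footprint and the second push
  have hvb : Codebook.value_bits s_114c21r.mem (g.cb s_114c21r.mem i) = (v.reg .rax).toNat + 1 := by
    rw [hcb2]
    simp only [vacc, voff, Mem.u8]
    rw [← e24]
    rw [w_same.readLE (v.reg .r14 + 24) 1 (by rw [t24]; omega) ?_]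
    · rw [stored_byte _ _ _ _ _ _ (by rw [t24, t1]; omega) (by rw [t1]; omega) (by rw [t24]; omega)]
      rw [byte_val _ hrax]
      omega
    · intro w hw
      simp only [List.mem_cons, List.mem_nil_iff, or_false] at hw
      rw [t24]
      rcases hw with rfl | rfl | rfl | rfl | rfl | rfl <;> simp only [] <;> omega
  exact ReachVia.done ⟨hP, by rw [hvb]; omega, by rw [hvb]; omega⟩

end Vorbis.Spec.start_decoder_C11b
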